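-- pv_equiv track=rewrite | github.com/jansowa/filter-sentence-transformer-translations | rate_st_translation_multi_gpu.py | _expand_devices_for_workers
-- ===== SOURCE A (Python) =====
-- from typing import Any, Dict, Iterable, List, Optional, Tuple
--
-- def _expand_devices_for_workers(devices: List[str], num_workers: int) -> List[str]:
--     """
--     If num_workers > len(devices), expand by repeating devices round-robin.
--     This enables forcing multiple workers on the same GPU (e.g., cuda:0, cuda:0).
--     """
--     if num_workers <= 0:
--         return devices
--     if len(devices) == 0:
--         return devices
--     if num_workers == len(devices):
--         return devices
--     expanded = []
--     for i in range(num_workers):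
--         expanded.append(devices[i % len(devices)])
--     return expanded
-- ===== SOURCE B (Python) =====
-- from typing import List
--
-- def _expand_devices_for_workers(devices: List[str], num_workers: int) -> List[str]:
--     if num_workers <= 0:
--         return devices
--     if len(devices) == 0:
--         return devices
--     if num_workers == len(devices):
--         return devices
--     return _tile(devices, num_workers)
--
-- def _tile(devices: List[str], n: int) -> List[str]:
--     # Repeatedly double the tile until it covers n entries, then slice.
--     # Correct because slicing a concatenation of copies of the original list
--     # yields the round-robin expansion; doubling reaches length >= n in
--     # O(log n) steps with O(n) total copying.
--     if n <= len(devices):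
--         return devices[:n]
--     return _tile(devices + devices, n)
-- ===== Notes on version B (the rewrite author's own statement) =====
-- stated objective: alternative
-- what changed: Replaces the per-index round-robin loop (append devices[i % len] for each i in range(num_workers)) with repeated doubling: the tile devices+devices is doubled until it covers num_workers entries and is then sliced, so there is no index or modulo arithmetic and only O(log n) concatenation steps.
import Mathlib
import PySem

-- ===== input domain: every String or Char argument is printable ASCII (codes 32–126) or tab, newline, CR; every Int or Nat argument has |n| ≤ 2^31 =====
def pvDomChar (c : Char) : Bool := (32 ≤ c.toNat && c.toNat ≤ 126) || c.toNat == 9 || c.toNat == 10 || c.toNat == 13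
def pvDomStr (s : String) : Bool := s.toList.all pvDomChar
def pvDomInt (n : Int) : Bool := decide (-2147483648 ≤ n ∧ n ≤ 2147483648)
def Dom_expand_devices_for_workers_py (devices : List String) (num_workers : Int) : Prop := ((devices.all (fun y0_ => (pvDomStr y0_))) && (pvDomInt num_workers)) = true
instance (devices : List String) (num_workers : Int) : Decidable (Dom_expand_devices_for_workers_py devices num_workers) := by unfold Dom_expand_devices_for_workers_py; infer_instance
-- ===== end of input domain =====

-- B replaces the per-index modulo loop with repeated doubling of the tile and a
-- final slice; objective: alternative (same asymptotic cost).

-- ===== PORT A =====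
-- literal transliteration of A: three guards, then a loop over range(num_workers)
-- appending devices[i % len(devices)] (index is always in range, so pyGetD is exact).
def expand_devices_for_workers_py (devices : List String) (num_workers : Int) : List String :=
  if num_workers ≤ 0 then devices
  else if devices.length = 0 then devices
  else if num_workers = (devices.length : Int) then devices
  else
    (PySem.List.pyRange 0 num_workers 1).foldl
      (fun expanded i =>
        expanded ++ [PySem.List.pyGetD devices (PySem.Int.mod i (devices.length : Int)) ""])
      []

-- ===== PORT B =====
-- transliteration of Source B's helper _tile; called with 0 < n, so n is a Nat here;
-- devices[:n] with n ≥ 0 is `take n` (exact). The `isEmpty` branch only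
-- totalises the recursion (unreachable: the caller guarantees devices ≠ []).
def pvTile (devices : List String) (n : Nat) : List String :=
  if n ≤ devices.length then devices.take n
  else if h : devices.isEmpty then []
  else pvTile (devices ++ devices) n
termination_by n - devices.length
decreasing_by
  have hlen : 0 < devices.length := by
    cases devices with
    | nil => simp at h
    | cons a l => simp
  simp only [List.length_append]
  omega

-- literal transliteration of Source B: same three guards, then _tile.
def expand_devices_for_workers_py_alt (devices : List String) (num_workers : Int) : List String :=
  if num_workers ≤ 0 then devices
  else if devices.length = 0 then devices
  else if num_workers = (devices.length : Int) then devices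
  else pvTile devices num_workers.toNat

-- ===== PRECONDITION & SPEC =====
def Spec_expand_devices_for_workers_py (devices : List String) (num_workers : Int) (out : List String) : Prop := out = expand_devices_for_workers_py_alt devices num_workers
instance (devices : List String) (num_workers : Int) (out : List String) : Decidable (Spec_expand_devices_for_workers_py devices num_workers out) := by unfold Spec_expand_devices_for_workers_py; infer_instance

-- ===== CLAIM (what is proved, stated in full; the proofs are below) =====
def Claim_equal_expand_devices_for_workers_py : Prop := ∀ (devices : List String) (num_workers : Int), Dom_expand_devices_for_workers_py devices num_workers → Spec_expand_devices_for_workers_py devices num_workers (expand_devices_for_workers_py devices num_workers)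

-- ===== LEMMAS AND PROOFS =====

-- B's doubling recursion computes the round-robin map that A's loop builds
theorem pvTile_eq_map : ∀ (devices : List String) (n : Nat), 0 < devices.length →
    pvTile devices n = (List.range n).map (fun k => devices[k % devices.length]!) := by
  intro devices n
  induction hm : n - devices.length using Nat.strong_induction_on generalizing devices with
  | _ m ih =>
    intro h
    rw [pvTile]
    by_cases hle : n ≤ devices.length
    · simp only [hle, if_true]
      apply List.ext_getElem
      · simp; omega
      · intro k h1 h2
        simp only [List.getElem_take, List.getElem_map, List.getElem_range]
        have hk : k < devices.length := by simp at h1; omega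
        rw [Nat.mod_eq_of_lt hk]
        exact (getElem!_pos devices k hk).symm
    · have hne : ¬ devices.isEmpty := by
        cases devices with
        | nil => simp at h
        | cons a l => simp
      rw [if_neg hle, dif_neg hne]
      have hlen2 : (devices ++ devices).length = 2 * devices.length := by
        simp [List.length_append]; omega
      rw [ih (n - (devices ++ devices).length) (by rw [hlen2]; omega)
            (devices ++ devices) rfl (by rw [hlen2]; omega)]
      apply List.map_congr_left
      intro k _
      -- (d ++ d)[k % (2·len)]! = d[k % len]!
      have h2l : 0 < (devices ++ devices).length := by rw [hlen2]; omega
      set L := devices.length with hL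
      have hmlt : k % (devices ++ devices).length < 2 * L := by
        rw [← hlen2]; exact Nat.mod_lt _ h2l
      have hmod : k % (devices ++ devices).length % L = k % L := by
        rw [hlen2, Nat.mod_mod_of_dvd]; exact ⟨2, by ring⟩
      have hkk : k % (devices ++ devices).length < (devices ++ devices).length :=
        Nat.mod_lt _ h2l
      rw [getElem!_pos (devices ++ devices) _ hkk,
          getElem!_pos devices _ (Nat.mod_lt _ h)]
      by_cases hk : k % (devices ++ devices).length < L
      · rw [List.getElem_append_left hk]
        congr 1
        rw [← hmod, Nat.mod_eq_of_lt hk]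
      · replace hk : L ≤ k % (devices ++ devices).length := Nat.le_of_not_lt hk
        rw [List.getElem_append_right hk]
        have hidx : k % (devices ++ devices).length - L = k % L := by
          calc k % (devices ++ devices).length - L
              = (k % (devices ++ devices).length - L) % L :=
                (Nat.mod_eq_of_lt (by omega)).symm
            _ = k % (devices ++ devices).length % L := (Nat.mod_eq_sub_mod hk).symm
            _ = k % L := hmod
        congr 1

-- ===== VERDICT (by name: the statement is the Claim_ definition above) =====
theorem expand_devices_for_workers_py_spec : Claim_equal_expand_devices_for_workers_py := by
  intro devices n _
  show expand_devices_for_workers_py devices n = expand_devices_for_workers_py_alt devices n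
  unfold expand_devices_for_workers_py expand_devices_for_workers_py_alt
  split_ifs with h1 h2 h3
  · rfl
  · rfl
  · rfl
  · replace h1 : 0 < n := by omega
    have hlen : 0 < devices.length := Nat.pos_of_ne_zero h2
    rw [pvTile_eq_map devices n.toNat hlen]
    rw [PySem.List.foldl_append_singleton_eq_map, List.nil_append, PySem.List.pyRange_one]
    simp only [Int.sub_zero, List.map_map]
    apply List.map_congr_left
    intro k hk
    simp only [Function.comp_apply, Int.zero_add]
    have hmod : PySem.Int.mod (k : Int) (devices.length : Int)
        = ((k % devices.length : Nat) : Int) := PySem.Int.mod_natCast k devices.length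
    rw [hmod, PySem.List.pyGetD_natCast]
    rw [List.getD_eq_getElem _ _ (Nat.mod_lt _ hlen)]
    exact (getElem!_pos devices _ (Nat.mod_lt _ hlen)).symm
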